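-- pv_equiv track=rewrite | github.com/minjungsung/Algorithm | 프로그래머스/0/181928. 이어 붙인 수/이어 붙인 수.py | solution
-- ===== SOURCE A (Python) =====
-- def solution(num_list):
--     answer = 0
--     num1 = 0
--     num2 = 0
--     for i in range(len(num_list)):
--         if (num_list[i] % 2):
--             num1 = num1 * 10 + num_list[i]
--         else:
--             num2 = num2 * 10 + num_list[i]
--     return num1 + num2
-- ===== SOURCE B (Python) =====
-- def solution(num_list):
--     # Right-to-left pass: each element contributes x * 10^(number of later
--     # same-parity elements); equals digit-concatenation by place value.
--     total = 0
--     pow_odd = 1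
--     pow_even = 1
--     for x in reversed(num_list):
--         if x % 2:
--             total += x * pow_odd
--             pow_odd *= 10
--         else:
--             total += x * pow_even
--             pow_even *= 10
--     return total
-- ===== Notes on version B (the rewrite author's own statement) =====
-- stated objective: alternative
-- what changed: B replaces A's left-to-right Horner recurrence (acc*10+x per parity) by a single right-to-left pass that adds each element times an explicit place-value weight 10^k maintained per parity.
import Mathlib
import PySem

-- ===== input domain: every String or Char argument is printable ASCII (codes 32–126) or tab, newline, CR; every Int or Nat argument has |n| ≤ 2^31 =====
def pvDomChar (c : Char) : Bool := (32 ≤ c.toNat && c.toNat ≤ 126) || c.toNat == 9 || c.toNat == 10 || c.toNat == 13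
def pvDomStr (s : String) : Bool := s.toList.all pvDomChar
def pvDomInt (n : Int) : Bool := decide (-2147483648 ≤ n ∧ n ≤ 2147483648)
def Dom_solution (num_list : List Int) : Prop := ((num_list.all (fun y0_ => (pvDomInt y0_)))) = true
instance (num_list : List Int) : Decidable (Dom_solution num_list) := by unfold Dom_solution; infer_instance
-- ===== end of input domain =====

-- B does one right-to-left pass adding x * 10^k with per-parity place-value weights, instead of A's left-to-right Horner recurrence; alternative algorithm, same cost.


-- ===== PORT A =====
-- loop over range(len(num_list)), maintaining (num1, num2) with Horner steps
def solution (num_list : List Int) : Int :=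
  let p := (PySem.List.pyRange 0 (num_list.length : Int) 1).foldl
    (fun (st : Int × Int) i =>
      if PySem.Int.mod (PySem.List.pyGetD num_list i 0) 2 ≠ 0 then
        (st.1 * 10 + PySem.List.pyGetD num_list i 0, st.2)
      else
        (st.1, st.2 * 10 + PySem.List.pyGetD num_list i 0)) (0, 0)
  p.1 + p.2

-- ===== PORT B =====
-- state: (total, pow_odd, pow_even); one pass over reversed(num_list)
def pvBStep (st : Int × Int × Int) (x : Int) : Int × Int × Int :=
  if PySem.Int.mod x 2 ≠ 0 then (st.1 + x * st.2.1, st.2.1 * 10, st.2.2)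
  else (st.1 + x * st.2.2, st.2.1, st.2.2 * 10)

def solution_alt (num_list : List Int) : Int :=
  (num_list.reverse.foldl pvBStep (0, 1, 1)).1

-- ===== PRECONDITION & SPEC =====
def Spec_solution (num_list : List Int) (out : Int) : Prop := out = solution_alt num_list
instance (num_list : List Int) (out : Int) : Decidable (Spec_solution num_list out) := by unfold Spec_solution; infer_instance

-- ===== CLAIM (what is proved, stated in full; the proofs are below) =====
def Claim_equal_solution : Prop := ∀ (num_list : List Int), Dom_solution num_list → Spec_solution num_list (solution num_list)

-- ===== LEMMAS AND PROOFS =====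
def pvStep (st : Int × Int) (x : Int) : Int × Int :=
  if PySem.Int.mod x 2 ≠ 0 then (st.1 * 10 + x, st.2) else (st.1, st.2 * 10 + x)

def pvCat (xs : List Int) : Int := xs.foldl (fun acc x => acc * 10 + x) 0

def pvOdds (xs : List Int) : List Int := xs.filter (fun x => PySem.Int.mod x 2 != 0)
def pvEvens (xs : List Int) : List Int := xs.filter (fun x => !(PySem.Int.mod x 2 != 0))

theorem pv_fold_split (xs : List Int) (a b : Int) :
    xs.foldl pvStep (a, b) =
      ((pvOdds xs).foldl (fun acc x => acc * 10 + x) a,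
       (pvEvens xs).foldl (fun acc x => acc * 10 + x) b) := by
  induction xs generalizing a b with
  | nil => rfl
  | cons x xs ih =>
      rcases Int.emod_two_eq x with h | h <;>
        simp [pvStep, pvOdds, pvEvens, h, ih]

theorem pv_cat_init (ys : List Int) (a : Int) :
    ys.foldl (fun acc x => acc * 10 + x) a = a * 10 ^ ys.length + pvCat ys := by
  induction ys generalizing a with
  | nil => simp [pvCat]
  | cons y ys ih =>
      simp only [List.foldl_cons, ih]
      rw [show pvCat (y :: ys) = List.foldl (fun acc x => acc * 10 + x) (0 * 10 + y) ys from rfl,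
        ih]
      simp only [List.length_cons, pow_succ]
      ring

theorem pvCat_cons (x : Int) (ys : List Int) :
    pvCat (x :: ys) = x * 10 ^ ys.length + pvCat ys := by
  show List.foldl (fun acc x => acc * 10 + x) (0 * 10 + x) ys = _
  rw [pv_cat_init]; ring_nf

theorem pv_bfold (xs : List Int) (t po pe : Int) :
    xs.reverse.foldl pvBStep (t, po, pe) =
      (t + po * pvCat (pvOdds xs) + pe * pvCat (pvEvens xs),
       po * 10 ^ (pvOdds xs).length, pe * 10 ^ (pvEvens xs).length) := by
  induction xs generalizing t po pe with
  | nil => simp [pvCat, pvOdds, pvEvens]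
  | cons x xs ih =>
      simp only [List.reverse_cons, List.foldl_append, ih, List.foldl_cons, List.foldl_nil]
      have hm : PySem.Int.mod x 2 = x % 2 := by
        rw [PySem.Int.mod_eq_emod_of_pos] ; norm_num
      by_cases hx : PySem.Int.mod x 2 ≠ 0
      · have h1 : x % 2 = 1 := by rw [hm] at hx; omega
        have ho : pvOdds (x :: xs) = x :: pvOdds xs := by
          simp [pvOdds, h1]
        have he : pvEvens (x :: xs) = pvEvens xs := by
          simp [pvEvens, h1]
        rw [ho, he, pvCat_cons]
        simp only [pvBStep, if_pos hx]
        refine Prod.ext ?_ (Prod.ext ?_ ?_) <;>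
          simp only [List.length_cons, pow_succ] <;> ring
      · have h0 : x % 2 = 0 := by rw [hm] at hx; omega
        have ho : pvOdds (x :: xs) = pvOdds xs := by
          simp [pvOdds, h0]
        have he : pvEvens (x :: xs) = x :: pvEvens xs := by
          simp [pvEvens, h0]
        rw [ho, he, pvCat_cons]
        simp only [pvBStep, if_neg hx]
        refine Prod.ext ?_ (Prod.ext ?_ ?_) <;>
          simp only [List.length_cons, pow_succ] <;> ring

theorem solution_spec : Claim_equal_solution := by
  intro num_list _
  unfold Spec_solution solution solution_alt
  rw [show (fun (st : Int × Int) i =>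
      if PySem.Int.mod (PySem.List.pyGetD num_list i 0) 2 ≠ 0 then
        (st.1 * 10 + PySem.List.pyGetD num_list i 0, st.2)
      else
        (st.1, st.2 * 10 + PySem.List.pyGetD num_list i 0)) =
    (fun st i => pvStep st (PySem.List.pyGetD num_list i 0)) from rfl]
  rw [PySem.List.foldl_pyRange_zero_pyGetD' num_list 0 pvStep ((0 : Int), (0 : Int))]
  rw [pv_fold_split, pv_bfold]
  simp only [pvCat]
  ring
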